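-- pv_equiv track=rewrite | github.com/SamueleVanini/Git_Hook | Components/Comment_Control.py | _is_canc_comment
-- ===== SOURCE A (Python) =====
-- def _is_canc_comment(line):
--     """
--     Check if the '#' is for a comment or into a string
--     :param line: line to control
--     :return True/False: boolean to indicate if '#' is comment or into a string
--     """
--     comment_block = False
--     for letter in line:
--         if letter == '\'' or letter == '\"':
--             comment_block = False if comment_block else True
--         if letter == '#' and comment_block is False:
--             return True
--         if letter == '#' and comment_block is True:
--             return False
-- ===== SOURCE B (Python) =====
-- def _is_canc_comment(line):
--     """
--     Check if the '#' is for a comment or into a string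
--     :param line: line to control
--     :return True/False: boolean to indicate if '#' is comment or into a string
--     """
--     i = line.find('#')
--     if i == -1:
--         return None
--     prefix = line[:i]
--     return (prefix.count("'") + prefix.count('"')) % 2 == 0
-- ===== Notes on version B (the rewrite author's own statement) =====
-- stated objective: simpler
-- what changed: Replaces A's early-returning character scan with a mutable toggle flag by a find-the-comment-mark then quote-count-parity-of-prefix decomposition using str.find and str.count.
import Mathlib
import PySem

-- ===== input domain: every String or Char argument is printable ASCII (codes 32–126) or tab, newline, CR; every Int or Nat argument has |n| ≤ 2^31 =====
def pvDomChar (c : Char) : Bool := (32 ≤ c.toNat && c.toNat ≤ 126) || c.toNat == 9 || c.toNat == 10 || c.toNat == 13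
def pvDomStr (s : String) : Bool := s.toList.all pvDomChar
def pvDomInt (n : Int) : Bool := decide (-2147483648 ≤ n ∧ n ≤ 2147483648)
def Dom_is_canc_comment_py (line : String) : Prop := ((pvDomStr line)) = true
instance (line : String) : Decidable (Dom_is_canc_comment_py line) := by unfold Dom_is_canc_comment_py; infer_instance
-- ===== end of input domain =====

-- B replaces A's early-returning scan with a mutable toggle flag by a find-first-'#' then quote-parity-of-prefix decomposition (simpler).


-- ===== PORT A =====
-- loop 'for letter in line' with the mutable flag comment_block, early returns
def pvLoopA : List Char → Bool → Option Bool
  | [], _ => none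
  | c :: rest, cb =>
    let cb1 := if c = '\'' ∨ c = '"' then (if cb then false else true) else cb
    if c = '#' ∧ cb1 = false then some true
    else if c = '#' ∧ cb1 = true then some false
    else pvLoopA rest cb1

def is_canc_comment_py (line : String) : Option Bool := pvLoopA line.toList false

-- ===== PORT B =====
-- line.find('#') ported as findIdx? (none = -1), line[:i] as take, str.count of a single char as List.count
def is_canc_comment_py_alt (line : String) : Option Bool :=
  match line.toList.findIdx? (· = '#') with
  | none => none
  | some i =>
    let pre := line.toList.take i
    some (decide ((pre.count '\'' + pre.count '"') % 2 = 0))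

-- ===== PRECONDITION & SPEC =====
def Spec_is_canc_comment_py (line : String) (out : Option Bool) : Prop := out = is_canc_comment_py_alt line
instance (line : String) (out : Option Bool) : Decidable (Spec_is_canc_comment_py line out) := by unfold Spec_is_canc_comment_py; infer_instance

-- ===== CLAIM (what is proved, stated in full; the proofs are below) =====
def Claim_equal_is_canc_comment_py : Prop := ∀ (line : String), Dom_is_canc_comment_py line → Spec_is_canc_comment_py line (is_canc_comment_py line)

-- ===== LEMMAS AND PROOFS =====
-- invariant: A's loop from state cb equals B's find-and-count with the parity shifted by cb
theorem pvLoopA_eq (cs : List Char) (cb : Bool) :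
    pvLoopA cs cb = (cs.findIdx? (· = '#')).map (fun i =>
      decide (((cs.take i).count '\'' + (cs.take i).count '"' + (if cb then 1 else 0)) % 2 = 0)) := by
  induction cs generalizing cb with
  | nil => simp [pvLoopA]
  | cons c rest ih =>
    by_cases hc : c = '#'
    · subst hc
      simp [pvLoopA, List.findIdx?_cons]
      cases cb <;> simp
    · have hq : Decidable (c = '\'' ∨ c = '"') := inferInstance
      simp only [pvLoopA, List.findIdx?_cons]
      rw [if_neg (by simp [hc]), if_neg (by simp [hc])]
      rw [ih]
      simp only [hc, decide_false, Bool.false_eq_true, if_false, Option.map_map]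
      cases h : rest.findIdx? (· = '#') with
      | none => simp
      | some i =>
        simp only [Option.map_some, Function.comp, Option.some.injEq, decide_eq_decide]
        by_cases hsq : c = '\''
        · subst hsq
          simp [List.take_succ_cons]
          cases cb <;> simp <;> omega
        · by_cases hdq : c = '"'
          · subst hdq
            simp [List.take_succ_cons]
            cases cb <;> simp <;> omega
          · simp [List.take_succ_cons, hsq, hdq]

-- ===== VERDICT (by name: the statement is the Claim_ definition above) =====
theorem is_canc_comment_py_spec : Claim_equal_is_canc_comment_py := by
  intro line _
  unfold Spec_is_canc_comment_py is_canc_comment_py is_canc_comment_py_alt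
  rw [pvLoopA_eq]
  cases h : line.toList.findIdx? (· = '#') <;> simp
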